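-- pv_equiv track=rewrite | github.com/NovasPlace/Sovereign_Engine_Core | onboarding.py | _parse_session
-- ===== SOURCE A (Python) =====
-- def _parse_session(session: str) -> tuple[str, list[str]]:
--     """Return (current_work, critical_context[]) from session.md."""
--     current = ""
--     critical: list[str] = []
--     section = ""
--     for line in session.splitlines():
--         s = line.strip()
--         if s.startswith("## Current Work"):
--             section = "work"
--         elif s.startswith("## Context That Must Not Be Lost"):
--             section = "critical"
--         elif s.startswith("## "):
--             section = ""
--         elif section == "work" and s and s != "_none_":
--             current = s
--         elif section == "critical" and s.startswith("- "):
--             critical.append(s[2:])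
--     return current, critical[:5]
-- ===== SOURCE B (Python) =====
-- def _parse_session(session: str) -> tuple[str, list[str]]:
--     """Return (current_work, critical_context[]) from session.md."""
--     # Phase 1: group stripped body lines into the two known section buckets.
--     work: list[str] = []
--     crit: list[str] = []
--     sec = None
--     for line in session.splitlines():
--         s = line.strip()
--         if s.startswith("## "):
--             if s.startswith("## Current Work"):
--                 sec = "work"
--             elif s.startswith("## Context That Must Not Be Lost"):
--                 sec = "critical"
--             else:
--                 sec = None
--         elif sec == "work":
--             work.append(s)
--         elif sec == "critical":
--             crit.append(s)
--     # Phase 2: two independent extractions.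
--     current = next((s for s in reversed(work) if s and s != "_none_"), "")
--     critical = [s[2:] for s in crit if s.startswith("- ")][:5]
--     return current, critical
-- ===== Notes on version B (the rewrite author's own statement) =====
-- stated objective: simpler
-- what changed: Replaces A's single loop that interleaves header dispatch with per-section extraction by a two-phase decomposition: one grouping pass bucketing body lines per section, then two independent comprehension-style extractions (reverse-scan for the last valid work line; filter/map/cap for critical).
import Mathlib
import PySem

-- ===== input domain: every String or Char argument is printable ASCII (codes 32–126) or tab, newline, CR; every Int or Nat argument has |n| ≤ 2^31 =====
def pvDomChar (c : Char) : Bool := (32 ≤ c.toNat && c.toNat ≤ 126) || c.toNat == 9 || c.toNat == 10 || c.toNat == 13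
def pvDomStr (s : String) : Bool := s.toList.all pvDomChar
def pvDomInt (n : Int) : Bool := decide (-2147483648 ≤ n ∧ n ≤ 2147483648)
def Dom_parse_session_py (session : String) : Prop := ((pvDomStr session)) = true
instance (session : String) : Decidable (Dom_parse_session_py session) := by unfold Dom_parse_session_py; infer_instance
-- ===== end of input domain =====

set_option maxHeartbeats 1000000

-- B is a simpler two-phase decomposition (group lines into section buckets, then extract); return value proved equal to A's.

-- ===== PORT A =====
-- loop body of A: state = (current, critical, section)
def pvStepA (st : String × List String × String) (line : String) : String × List String × String :=
  let s := PySem.Str.strip line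
  if PySem.Str.startswith s "## Current Work" then (st.1, st.2.1, "work")
  else if PySem.Str.startswith s "## Context That Must Not Be Lost" then (st.1, st.2.1, "critical")
  else if PySem.Str.startswith s "## " then (st.1, st.2.1, "")
  else if st.2.2 == "work" && !(s == "") && !(s == "_none_") then (s, st.2.1, st.2.2)
  else if st.2.2 == "critical" && PySem.Str.startswith s "- " then
    (st.1, st.2.1 ++ [PySem.Str.slice s (some 2) none], st.2.2)
  else st

def parse_session_py (session : String) : String × List String :=
  let st := (PySem.Str.splitlines session).foldl pvStepA ("", [], "")
  (st.1, PySem.List.slice st.2.1 none (some 5))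

-- ===== PORT B =====
-- grouping pass of B: state = (work bucket, critical bucket, active section)
def pvStepB (st : List String × List String × Option String) (line : String) :
    List String × List String × Option String :=
  let s := PySem.Str.strip line
  if PySem.Str.startswith s "## " then
    (st.1, st.2.1,
      if PySem.Str.startswith s "## Current Work" then some "work"
      else if PySem.Str.startswith s "## Context That Must Not Be Lost" then some "critical"
      else none)
  else if st.2.2 == some "work" then (st.1 ++ [s], st.2.1, st.2.2)
  else if st.2.2 == some "critical" then (st.1, st.2.1 ++ [s], st.2.2)
  else st

def parse_session_py_alt (session : String) : String × List String :=
  let st := (PySem.Str.splitlines session).foldl pvStepB ([], [], none)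
  let current := (st.1.reverse.find? (fun s => !(s == "") && !(s == "_none_"))).getD ""
  let critical :=
    PySem.List.slice
      ((st.2.1.filter (fun s => PySem.Str.startswith s "- ")).map
        (fun s => PySem.Str.slice s (some 2) none)) none (some 5)
  (current, critical)

-- ===== PRECONDITION & SPEC =====
def Spec_parse_session_py (session : String) (out : String × List String) : Prop := out = parse_session_py_alt session
instance (session : String) (out : String × List String) : Decidable (Spec_parse_session_py session out) := by unfold Spec_parse_session_py; infer_instance

-- ===== CLAIM (what is proved, stated in full; the proofs are below) =====
def Claim_equal_parse_session_py : Prop := ∀ (session : String), Dom_parse_session_py session → Spec_parse_session_py session (parse_session_py session)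

-- ===== LEMMAS AND PROOFS =====

-- abstractions of B's two extraction passes, used to state the loop invariant
def pvF1 (w : List String) : String :=
  List.foldl (fun a s => if (!(s == "") && !(s == "_none_")) = true then s else a) "" w

def pvF2 (c : List String) : List String :=
  (c.filter (fun s => PySem.Str.startswith s "- ")).map (fun s => PySem.Str.slice s (some 2) none)

def pvRel (stA : String × List String × String) (stB : List String × List String × Option String) : Prop :=
  stA.1 = pvF1 stB.1 ∧ stA.2.1 = pvF2 stB.2.1 ∧ stA.2.2 = stB.2.2.getD "" ∧
    (stB.2.2 = none ∨ stB.2.2 = some "work" ∨ stB.2.2 = some "critical")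

lemma pvStartsWork_imp {t : List Char} (h : PySem.Chars.startswith t "## Current Work".toList = true) :
    PySem.Chars.startswith t "## ".toList = true := by
  rw [PySem.Chars.startswith_iff] at h ⊢
  exact List.IsPrefix.trans (by decide) h

lemma pvStartsCrit_imp {t : List Char} (h : PySem.Chars.startswith t "## Context That Must Not Be Lost".toList = true) :
    PySem.Chars.startswith t "## ".toList = true := by
  rw [PySem.Chars.startswith_iff] at h ⊢
  exact List.IsPrefix.trans (by decide) h

lemma pvF1_append_one (w : List String) (s : String) :
    pvF1 (w ++ [s]) = if (!(s == "") && !(s == "_none_")) = true then s else pvF1 w := by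
  simp [pvF1, List.foldl_append]

lemma pvF2_append_one (c : List String) (s : String) :
    pvF2 (c ++ [s]) =
      if PySem.Chars.startswith s.toList "- ".toList = true then pvF2 c ++ [PySem.Str.slice s (some 2) none]
      else pvF2 c := by
  by_cases h : PySem.Chars.startswith s.toList "- ".toList = true <;> simp_all [pvF2]

lemma pvStep_rel (stA : String × List String × String)
    (stB : List String × List String × Option String) (line : String)
    (h : pvRel stA stB) : pvRel (pvStepA stA line) (pvStepB stB line) := by
  obtain ⟨h1, h2, h3, hsec⟩ := h
  obtain ⟨curA, critA, secA⟩ := stA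
  obtain ⟨w, c, secB⟩ := stB
  simp only at h1 h2 h3 hsec
  subst h1 h2 h3
  unfold pvStepA pvStepB
  simp only [PySem.Str.startswith_eq]
  by_cases hw : PySem.Chars.startswith (PySem.Str.strip line).toList "## Current Work".toList = true
  · rw [if_pos hw, if_pos (pvStartsWork_imp hw), if_pos hw]
    exact ⟨rfl, rfl, rfl, Or.inr (Or.inl rfl)⟩
  · rw [if_neg hw, if_neg hw]
    by_cases hc : PySem.Chars.startswith (PySem.Str.strip line).toList "## Context That Must Not Be Lost".toList = true
    · rw [if_pos hc, if_pos (pvStartsCrit_imp hc), if_pos hc]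
      exact ⟨rfl, rfl, rfl, Or.inr (Or.inr rfl)⟩
    · rw [if_neg hc, if_neg hc]
      by_cases hh : PySem.Chars.startswith (PySem.Str.strip line).toList "## ".toList = true
      · rw [if_pos hh, if_pos hh]
        exact ⟨rfl, rfl, rfl, Or.inl rfl⟩
      · rw [if_neg hh, if_neg hh]
        rcases hsec with hn | hn | hn <;> subst hn
        · -- section inactive: both sides keep their state
          simp [pvRel]
        · -- work section
          by_cases hg : (!(PySem.Str.strip line == "") && !(PySem.Str.strip line == "_none_")) = true
          · simp [pvRel, hg, pvF1_append_one]
          · simp [pvRel, hg, pvF1_append_one]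
        · -- critical section
          by_cases hd : PySem.Chars.startswith (PySem.Str.strip line).toList "- ".toList = true <;>
            simp at hd <;> simp [pvRel, hd, pvF2_append_one]

lemma pvFold_rel (lines : List String) (stA : String × List String × String)
    (stB : List String × List String × Option String) (h : pvRel stA stB) :
    pvRel (lines.foldl pvStepA stA) (lines.foldl pvStepB stB) := by
  induction lines generalizing stA stB with
  | nil => exact h
  | cons l ls ih => exact ih _ _ (pvStep_rel _ _ l h)

lemma pvF1_eq_find (w : List String) (acc : String) :
    List.foldl (fun a s => if (!(s == "") && !(s == "_none_")) = true then s else a) acc w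
      = ((w.reverse.find? (fun s => !(s == "") && !(s == "_none_"))).getD acc) := by
  induction w generalizing acc with
  | nil => rfl
  | cons a w ih =>
      simp only [List.foldl_cons, List.reverse_cons, List.find?_append]
      rw [ih]
      cases hf : w.reverse.find? (fun s => !(s == "") && !(s == "_none_")) with
      | some x => simp
      | none =>
          by_cases hg : (!(a == "") && !(a == "_none_")) = true <;>
            simp [List.find?, hg]

-- ===== VERDICT (by name: the statement is the Claim_ definition above) =====
theorem parse_session_py_spec : Claim_equal_parse_session_py := by
  intro session _
  unfold Spec_parse_session_py parse_session_py parse_session_py_alt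
  have h := pvFold_rel (PySem.Str.splitlines session) ("", [], "") ([], [], none)
    ⟨rfl, rfl, rfl, Or.inl rfl⟩
  obtain ⟨h1, h2, _, _⟩ := h
  simp only [h1, h2, pvF1, pvF2, pvF1_eq_find]
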